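-- pv_equiv track=rewrite | github.com/dmwhyatt/centre-for-music-and-science.github.io | scripts/fetch_publication_abstracts.py | merge_abstract
-- ===== SOURCE A (Python) =====
-- from typing import Any
-- from typing import Dict
--
-- def merge_abstract(front_matter: Dict[str, Any], abstract: str) -> Dict[str, Any]:
--     """Return front matter with ``abstract`` inserted after link metadata."""
--     base = {k: v for k, v in front_matter.items() if k != "abstract"}
--     out: Dict[str, Any] = {}
--     inserted = False
--     for key, val in base.items():
--         if (
--             key == "bibtex"
--             and "link" not in base
--             and "doi" not in base
--             and not inserted
--         ):
--             out["abstract"] = abstract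
--             inserted = True
--         out[key] = val
--         if key in ("link", "doi") and not inserted:
--             out["abstract"] = abstract
--             inserted = True
--     if not inserted:
--         out["abstract"] = abstract
--     return out
-- ===== SOURCE B (Python) =====
-- def merge_abstract(front_matter, abstract):
--     """Return front matter with ``abstract`` inserted after link metadata.
--
--     Two-phase: locate the insertion index in the key order, then rebuild."""
--     keys = [k for k in front_matter if k != "abstract"]
--     idx = next((i + 1 for i, k in enumerate(keys) if k in ("link", "doi")), None)
--     if idx is None:
--         idx = keys.index("bibtex") if "bibtex" in keys else len(keys)
--     new_keys = keys[:idx] + ["abstract"] + keys[idx:]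
--     return {k: (abstract if k == "abstract" else front_matter[k]) for k in new_keys}
-- ===== Notes on version B (the rewrite author's own statement) =====
-- stated objective: alternative
-- what changed: A's single stateful pass (threading an 'inserted' flag and deciding at each key whether to emit the abstract) is replaced by a two-phase locate-then-rebuild: compute the insertion index (after the first link/doi key, else at bibtex, else the end) over the key list, splice 'abstract' in at that index, and rebuild the dict from lookups.
import Mathlib
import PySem

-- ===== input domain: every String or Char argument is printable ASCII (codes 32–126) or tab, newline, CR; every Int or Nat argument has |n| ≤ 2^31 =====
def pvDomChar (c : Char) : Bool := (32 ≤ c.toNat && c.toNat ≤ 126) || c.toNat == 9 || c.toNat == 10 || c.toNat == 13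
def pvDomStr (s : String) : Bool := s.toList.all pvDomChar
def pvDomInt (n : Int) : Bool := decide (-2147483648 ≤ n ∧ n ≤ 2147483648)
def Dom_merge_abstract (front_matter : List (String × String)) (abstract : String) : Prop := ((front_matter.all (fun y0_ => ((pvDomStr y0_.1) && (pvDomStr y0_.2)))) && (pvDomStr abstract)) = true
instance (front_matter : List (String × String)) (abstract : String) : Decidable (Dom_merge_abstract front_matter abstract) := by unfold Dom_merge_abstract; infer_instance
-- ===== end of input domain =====

-- B replaces A's single stateful insertion pass by a locate-then-rebuild decomposition (objective: alternative;
-- same cost). The dict argument is the association list read as a Python dict: both ports start from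
-- PySem.Dict.ofList front_matter, exactly as building the Python dict from those pairs would.

-- ===== PORT A =====
-- A's loop body over base.items(), threading the (out, inserted) state.

def stepA (hasLink hasDoi : Bool) (abstract : String)
    (st : PySem.Dict String String × Bool) (kv : String × String) :
    PySem.Dict String String × Bool :=
  let st := if kv.1 == "bibtex" && !hasLink && !hasDoi && !st.2
            then (st.1.insert "abstract" abstract, true) else st
  let st := (st.1.insert kv.1 kv.2, st.2)
  if (kv.1 == "link" || kv.1 == "doi") && !st.2
  then (st.1.insert "abstract" abstract, true) else st

-- Python A: the dict comprehension 'base = {k: v for k, v in front_matter.items() if k != "abstract"}'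
-- over the unique-key dict is exactly the filter of its items list; the loop is stepA folded over base.
def merge_abstract (front_matter : List (String × String)) (abstract : String) : List (String × String) :=
  let fm := PySem.Dict.ofList front_matter
  let base := fm.items.filter (fun kv => kv.1 != "abstract")
  let hasLink := base.any (fun kv => kv.1 == "link")
  let hasDoi := base.any (fun kv => kv.1 == "doi")
  let res := base.foldl (stepA hasLink hasDoi abstract) (PySem.Dict.empty, false)
  (if !res.2 then res.1.insert "abstract" abstract else res.1).items

-- ===== PORT B =====
-- B's insertion index: right after the first 'link'/'doi' key, else at 'bibtex', else the end.
def idxB (keys : List String) : Nat :=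
  match keys.findIdx? (fun k => k == "link" || k == "doi") with
  | some i => i + 1
  | none => match keys.findIdx? (fun k => k == "bibtex") with
    | some j => j
    | none => keys.length

-- B: key list without 'abstract', locate the index, splice, rebuild from lookups.
def merge_abstract_alt (front_matter : List (String × String)) (abstract : String) : List (String × String) :=
  let d := PySem.Dict.ofList front_matter
  let keys := d.keys.filter (fun k => k != "abstract")
  let idx := idxB keys
  (keys.take idx ++ ["abstract"] ++ keys.drop idx).map
    (fun k => (k, if k == "abstract" then abstract else d.getD k ""))


-- ===== PRECONDITION & SPEC =====
def Spec_merge_abstract (front_matter : List (String × String)) (abstract : String) (out : List (String × String)) : Prop := out = merge_abstract_alt front_matter abstract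
instance (front_matter : List (String × String)) (abstract : String) (out : List (String × String)) : Decidable (Spec_merge_abstract front_matter abstract out) := by unfold Spec_merge_abstract; infer_instance

-- ===== CLAIM (what is proved, stated in full; the proofs are below) =====
def Claim_equal_merge_abstract : Prop := ∀ (front_matter : List (String × String)) (abstract : String), Dom_merge_abstract front_matter abstract → Spec_merge_abstract front_matter abstract (merge_abstract front_matter abstract)

-- ===== LEMMAS AND PROOFS =====

-- What A's loop inserts where, as a structural recursion on the item list (proof-side only).
def spliceA (hasLD : Bool) (a : String) : List (String × String) → List (String × String)
  | [] => [("abstract", a)]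
  | kv :: rest =>
    if kv.1 == "bibtex" && !hasLD then ("abstract", a) :: kv :: rest
    else if kv.1 == "link" || kv.1 == "doi" then kv :: ("abstract", a) :: rest
    else kv :: spliceA hasLD a rest

theorem foldl_stepA_true (hasLink hasDoi : Bool) (a : String) :
    ∀ (l : List (String × String)) (d : PySem.Dict String String),
    l.foldl (stepA hasLink hasDoi a) (d, true)
      = (l.foldl (fun d kv => d.insert kv.1 kv.2) d, true) := by
  intro l
  induction l with
  | nil => intro d; rfl
  | cons kv rest ih =>
    intro d
    simp [List.foldl_cons, stepA, ih]

theorem main_fold (hasLink hasDoi : Bool) (a : String) :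
    ∀ (I : List (String × String)) (d : PySem.Dict String String),
    (∀ kv ∈ I, d.contains kv.1 = false) →
    (I.map Prod.fst).Nodup →
    d.contains "abstract" = false →
    (∀ kv ∈ I, kv.1 ≠ "abstract") →
    (let r := I.foldl (stepA hasLink hasDoi a) (d, false)
     (if !r.2 then r.1.insert "abstract" a else r.1).items)
      = d.items ++ spliceA (hasLink || hasDoi) a I := by
  intro I
  induction I with
  | nil =>
    intro d _ _ hab _
    simp [spliceA, PySem.Dict.items_insert_of_not_contains _ _ hab]
  | cons kv rest ih =>
    intro d hfresh hnd hab habI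
    have hkv_ab : kv.1 ≠ "abstract" := habI kv (by simp)
    have hkvd : d.contains kv.1 = false := hfresh kv (by simp)
    have hnd0 := hnd
    rw [List.map_cons, List.nodup_cons] at hnd0
    obtain ⟨hkvrest, hnd'⟩ := hnd0
    have hrest_ne : ∀ p ∈ rest, p.1 ≠ kv.1 := by
      intro p hp he
      exact hkvrest (he ▸ List.mem_map_of_mem hp)
    have hab_ne : ∀ p ∈ rest, p.1 ≠ "abstract" := fun p hp => habI p (by simp [hp])
    by_cases hb : kv.1 = "bibtex" ∧ hasLink = false ∧ hasDoi = false
    · obtain ⟨hb1, hb2, hb3⟩ := hb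
      have hstep : stepA hasLink hasDoi a (d, false) kv
          = ((d.insert "abstract" a).insert kv.1 kv.2, true) := by
        simp [stepA, hb1, hb2, hb3]
      rw [List.foldl_cons, hstep, foldl_stepA_true]
      have hc1 : (d.insert "abstract" a).contains kv.1 = false := by
        rw [PySem.Dict.contains_insert]
        simp [hkv_ab, hkvd]
      have hfresh2 : ∀ p ∈ rest, ((d.insert "abstract" a).insert kv.1 kv.2).contains p.1 = false := by
        intro p hp
        rw [PySem.Dict.contains_insert, PySem.Dict.contains_insert]
        simp [hrest_ne p hp, hab_ne p hp, hfresh p (by simp [hp])]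
      have := PySem.Dict.items_foldl_insert_fresh rest Prod.fst Prod.snd
        ((d.insert "abstract" a).insert kv.1 kv.2) hfresh2 hnd'
      simp only [Bool.not_true, Bool.false_eq_true, if_false] at *
      rw [this]
      rw [PySem.Dict.items_insert_of_not_contains _ _ hc1,
          PySem.Dict.items_insert_of_not_contains _ _ hab]
      simp [spliceA, hb1, hb2, hb3]
      rw [← hb1]
    · by_cases hl : (kv.1 = "link" ∨ kv.1 = "doi")
      · have hnb : (kv.1 == "bibtex") = false := by
          rcases hl with h | h <;> simp [h]
        have hstep : stepA hasLink hasDoi a (d, false) kv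
            = ((d.insert kv.1 kv.2).insert "abstract" a, true) := by
          rcases hl with h | h <;> simp [stepA, h]
        rw [List.foldl_cons, hstep, foldl_stepA_true]
        have hc1 : (d.insert kv.1 kv.2).contains "abstract" = false := by
          rw [PySem.Dict.contains_insert]
          simp [Ne.symm hkv_ab, hab]
        have hfresh2 : ∀ p ∈ rest, ((d.insert kv.1 kv.2).insert "abstract" a).contains p.1 = false := by
          intro p hp
          rw [PySem.Dict.contains_insert, PySem.Dict.contains_insert]
          simp [hrest_ne p hp, hab_ne p hp, hfresh p (by simp [hp])]
        have := PySem.Dict.items_foldl_insert_fresh rest Prod.fst Prod.snd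
          ((d.insert kv.1 kv.2).insert "abstract" a) hfresh2 hnd'
        simp only [Bool.not_true, Bool.false_eq_true, if_false] at *
        rw [this]
        rw [PySem.Dict.items_insert_of_not_contains _ _ hc1,
            PySem.Dict.items_insert_of_not_contains _ _ hkvd]
        have hsp : spliceA (hasLink || hasDoi) a (kv :: rest)
            = kv :: ("abstract", a) :: rest := by
          rcases hl with h | h <;> simp [spliceA, h]
        rw [hsp]
        simp
      · -- plain step: neither abstract-insertion branch fires at kv
        push Not at hl
        obtain ⟨hl1, hl2⟩ := hl
        have hcond1 : (kv.1 == "bibtex" && !hasLink && !hasDoi) = false := by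
          by_cases h1 : kv.1 = "bibtex"
          · have : ¬ (hasLink = false ∧ hasDoi = false) := fun hc => hb ⟨h1, hc⟩
            rcases Bool.eq_false_or_eq_true hasLink with h | h <;>
              rcases Bool.eq_false_or_eq_true hasDoi with h' | h' <;>
              simp_all
          · simp [h1]
        have hstep : stepA hasLink hasDoi a (d, false) kv
            = (d.insert kv.1 kv.2, false) := by
          simp [stepA, hl1, hl2, hcond1]
        rw [List.foldl_cons, hstep]
        have hfresh' : ∀ p ∈ rest, (d.insert kv.1 kv.2).contains p.1 = false := by
          intro p hp
          rw [PySem.Dict.contains_insert]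
          simp [hrest_ne p hp, hfresh p (by simp [hp])]
        have hab' : (d.insert kv.1 kv.2).contains "abstract" = false := by
          rw [PySem.Dict.contains_insert]
          simp [Ne.symm hkv_ab, hab]
        have hrec := ih (d.insert kv.1 kv.2) hfresh' hnd' hab' hab_ne
        simp only at hrec
        rw [hrec, PySem.Dict.items_insert_of_not_contains _ _ hkvd]
        have hsp : spliceA (hasLink || hasDoi) a (kv :: rest)
            = kv :: spliceA (hasLink || hasDoi) a rest := by
          simp only [spliceA]
          rw [if_neg, if_neg]
          · simp [hl1, hl2]
          · simp only [Bool.not_or] at *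
            intro hcc
            simp only [Bool.and_eq_true, beq_iff_eq, Bool.not_eq_true'] at hcc
            obtain ⟨h1, h2⟩ := hcc
            exact hb ⟨h1, h2⟩
        rw [hsp]
        simp

theorem spliceA_eq_splice (a : String) :
    ∀ (I : List (String × String)),
    spliceA ((I.any fun kv => kv.1 == "link") || (I.any fun kv => kv.1 == "doi")) a I
      = I.take (idxB (I.map Prod.fst)) ++ [("abstract", a)] ++ I.drop (idxB (I.map Prod.fst)) := by
  intro I
  induction I with
  | nil => simp [spliceA, idxB]
  | cons kv rest ih =>
    by_cases hl : (kv.1 = "link" ∨ kv.1 = "doi")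
    · have hnb : (kv.1 == "bibtex") = false := by
        rcases hl with h | h <;> simp [h]
      have hp1 : ((kv.1 == "link" || kv.1 == "doi") : Bool) = true := by
        rcases hl with h | h <;> simp [h]
      have hidx : idxB ((kv :: rest).map Prod.fst) = 1 := by
        simp [idxB, List.findIdx?_cons, hp1]
      rw [hidx]
      simp [spliceA, hnb, hp1]
    · push Not at hl
      obtain ⟨hl1, hl2⟩ := hl
      have hp1 : ((kv.1 == "link" || kv.1 == "doi") : Bool) = false := by simp [hl1, hl2]
      have hflagL : ((kv :: rest).any fun p => p.1 == "link")
          = (rest.any fun p => p.1 == "link") := by simp [hl1]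
      have hflagD : ((kv :: rest).any fun p => p.1 == "doi")
          = (rest.any fun p => p.1 == "doi") := by simp [hl2]
      rcases hld : (rest.map Prod.fst).findIdx? (fun k => k == "link" || k == "doi") with _ | i
      · -- no link/doi anywhere
        have hnold : ∀ k ∈ rest.map Prod.fst, ((k == "link" || k == "doi") : Bool) = false := by
          have := List.findIdx?_eq_none_iff.mp hld
          simpa using this
        have hrestL : (rest.any fun p => p.1 == "link") = false := by
          simp only [List.any_eq_false]
          intro p hp
          have := hnold p.1 (List.mem_map_of_mem hp)
          simp only [Bool.or_eq_false_iff] at this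
          simp [this.1]
        have hrestD : (rest.any fun p => p.1 == "doi") = false := by
          simp only [List.any_eq_false]
          intro p hp
          have := hnold p.1 (List.mem_map_of_mem hp)
          simp only [Bool.or_eq_false_iff] at this
          simp [this.2]
        have hflags : (((kv :: rest).any fun p => p.1 == "link") ||
            ((kv :: rest).any fun p => p.1 == "doi")) = false := by
          rw [hflagL, hflagD, hrestL, hrestD]; rfl
        rw [hflags]
        by_cases hbt : kv.1 = "bibtex"
        · have hidx : idxB ((kv :: rest).map Prod.fst) = 0 := by
            simp [idxB, List.findIdx?_cons, hld, hbt]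
          rw [hidx]
          simp [spliceA, hbt]
        · have hbt' : (kv.1 == "bibtex") = false := by simp [hbt]
          have hidx : idxB ((kv :: rest).map Prod.fst)
              = idxB (rest.map Prod.fst) + 1 := by
            rcases hbd : (rest.map Prod.fst).findIdx? (fun k => k == "bibtex") with _ | j <;>
              simp [idxB, List.findIdx?_cons, hp1, hld, hbt', hbd]
          rw [hidx]
          simp only [spliceA]
          rw [if_neg (by simp [hbt']), if_neg (by rw [hp1]; simp)]
          have ih' : spliceA false a rest
              = rest.take (idxB (rest.map Prod.fst)) ++ [("abstract", a)]
                ++ rest.drop (idxB (rest.map Prod.fst)) := by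
            simpa [hrestL, hrestD] using ih
          rw [ih']
          simp
      · -- first link/doi of rest at index i
        have hex : ∃ p ∈ rest, ((p.1 == "link" || p.1 == "doi") : Bool) = true := by
          by_contra hc
          push Not at hc
          have hnone : (rest.map Prod.fst).findIdx? (fun k => k == "link" || k == "doi") = none := by
            refine List.findIdx?_eq_none_iff.mpr ?_
            intro k hk
            obtain ⟨p, hp, rfl⟩ := List.mem_map.mp hk
            simpa using hc p hp
          simp [hld] at hnone
        obtain ⟨p, hp, hpk⟩ := hex
        have hflags : (((kv :: rest).any fun q => q.1 == "link") ||
            ((kv :: rest).any fun q => q.1 == "doi")) = true := by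
          simp only [Bool.or_eq_true, List.any_eq_true]
          rcases Bool.or_eq_true_iff.mp hpk with h | h
          · exact Or.inl ⟨p, by simp [hp], h⟩
          · exact Or.inr ⟨p, by simp [hp], h⟩
        have hidx : idxB ((kv :: rest).map Prod.fst)
            = idxB (rest.map Prod.fst) + 1 := by
          simp [idxB, List.findIdx?_cons, hp1, hld]
        rw [hidx]
        simp only [spliceA]
        rw [if_neg (by rw [hflags]; simp), if_neg (by rw [hp1]; simp)]
        rw [hflagL, hflagD, ih]
        simp

theorem merge_eq (fm : List (String × String)) (a : String) :
    merge_abstract fm a = merge_abstract_alt fm a := by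
  simp only [merge_abstract, merge_abstract_alt]
  set d := PySem.Dict.ofList fm with hd
  set I := d.items.filter (fun kv => kv.1 != "abstract") with hI
  have hknd : (I.map Prod.fst).Nodup := by
    have h1 : d.keys.Nodup := PySem.Dict.nodup_keys_ofList fm
    have h2 : I.map Prod.fst |>.Sublist (d.items.map Prod.fst) :=
      List.Sublist.map Prod.fst List.filter_sublist
    have h3 : d.items.map Prod.fst = d.keys := by
      simp [PySem.Dict.keys]
    exact (h3 ▸ h2).nodup h1
  have habI : ∀ kv ∈ I, kv.1 ≠ "abstract" := by
    intro kv hkv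
    have := (List.mem_filter.mp hkv).2
    simpa using this
  have hmemI : ∀ kv ∈ I, kv ∈ d.items := fun kv h => (List.mem_filter.mp h).1
  -- LHS: A's loop result
  have hA := main_fold (I.any fun kv => kv.1 == "link") (I.any fun kv => kv.1 == "doi") a I
    PySem.Dict.empty (by intro kv _; simp [PySem.Dict.contains_empty]) hknd
    (by simp [PySem.Dict.contains_empty]) habI
  simp only at hA
  rw [hA]
  rw [spliceA_eq_splice]
  -- RHS: B's splice
  have hkeys : d.keys.filter (fun k => k != "abstract") = I.map Prod.fst := by
    have h3 : d.keys = d.items.map Prod.fst := by simp [PySem.Dict.keys]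
    rw [h3, List.filter_map]
    rfl
  rw [hkeys]
  have hid : ∀ J : List (String × String), (∀ kv ∈ J, kv ∈ I) →
      J.map ((fun k => (k, if k == "abstract" then a else d.getD k "")) ∘ Prod.fst) = J := by
    intro J hJ
    have : ∀ kv ∈ J, ((fun k => (k, if k == "abstract" then a else d.getD k "")) ∘ Prod.fst) kv
        = id kv := by
      intro kv hkv
      have hm := hmemI kv (hJ kv hkv)
      have hne : (kv.1 == "abstract") = false := by simp [habI kv (hJ kv hkv)]
      have hget : d.getD kv.1 "" = kv.2 := by
        refine PySem.Dict.getD_of_mem_items d ?_ (PySem.Dict.nodup_keys_ofList fm) ""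
        simpa using hm
      simp [Function.comp, hne, hget]
    rw [List.map_congr_left this, List.map_id]
  set n := idxB (I.map Prod.fst) with hn
  rw [List.map_append, List.map_append, ← List.map_take, ← List.map_drop,
      List.map_map, List.map_map]
  rw [hid (I.take n) (fun kv h => List.mem_of_mem_take h),
      hid (I.drop n) (fun kv h => List.mem_of_mem_drop h)]
  have hemp : (PySem.Dict.empty : PySem.Dict String String).items = [] := rfl
  rw [hemp, List.nil_append]
  simp

-- ===== VERDICT (by name: the statement is the Claim_ definition above) =====
theorem merge_abstract_spec : Claim_equal_merge_abstract := by
  intro front_matter abstract _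
  unfold Spec_merge_abstract
  exact merge_eq front_matter abstract
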